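-- pv_equiv track=rewrite | github.com/Amanuel94/CF-Solutions | B_Collatz_Conjecture.py | solve
-- ===== SOURCE A (Python) =====
-- def solve(x, y, k):
--
--
--     if k == 0:
--         return x
--     if x < y:
--         return  (x-1 + k)%(y-1) + 1
--
--     req =  ((-x)%y)
--     if req > k:
--         return (x + k)//y if (x+k)%y == 0 else  x + k
--     x += req
--     while x%y == 0:
--         x//=y
--     return solve(x, y, k - req)
-- ===== SOURCE B (Python) =====
-- def solve(x, y, k):
--     if k == 0:
--         return x
--     while x >= y:
--         need = (-x) % y
--         if k < need:
--             x += k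
--             return x // y if x % y == 0 else x
--         k -= need
--         x += need
--         while x % y == 0:
--             x //= y
--         if k == 0:
--             return x
--     return (x + k - 1) % (y - 1) + 1
-- ===== Notes on version B (the rewrite author's own statement) =====
-- stated objective: alternative
-- what changed: A's tail recursion (k==0 / x<y checks at every call, recursive descent) is replaced by an iterative while x>=y loop that maintains x and k directly, checks the budget as k < need, returns early when k hits 0 after an update, and falls through to the modular cycle formula when x drops below y.
-- outside the precondition, e.g. on solve(769777461, -2, 6): A returns 0, B returns 0; on solve(0, 1, 3): A raises ZeroDivisionError, B raises ZeroDivisionError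
import Mathlib
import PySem

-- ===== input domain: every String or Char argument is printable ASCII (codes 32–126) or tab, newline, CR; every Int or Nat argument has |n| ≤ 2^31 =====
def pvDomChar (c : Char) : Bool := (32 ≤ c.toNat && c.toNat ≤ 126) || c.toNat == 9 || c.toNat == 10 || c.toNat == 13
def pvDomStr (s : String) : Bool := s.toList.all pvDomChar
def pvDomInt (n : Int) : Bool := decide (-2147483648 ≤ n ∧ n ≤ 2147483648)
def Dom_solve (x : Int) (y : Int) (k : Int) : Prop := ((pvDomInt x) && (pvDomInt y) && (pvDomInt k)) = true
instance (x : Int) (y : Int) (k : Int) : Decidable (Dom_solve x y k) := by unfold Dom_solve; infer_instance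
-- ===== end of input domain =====

-- B replaces A's tail recursion by an iterative while-loop maintaining x and k; return value only, no side effects.

-- ===== PORT A =====
-- shared transliteration of the two-line inner loop 'while x % y == 0: x //= y'
-- (it appears verbatim in both A and Source B); the toNat guard only makes the
-- recursion total — on Pre_ (2 ≤ y, x > 0, so the quotient shrinks) it always holds
def stripFactors (x : Int) (y : Int) : Int :=
  if h : PySem.Int.mod x y = 0 ∧ (PySem.Int.floordiv x y).toNat < x.toNat then
    stripFactors (PySem.Int.floordiv x y) y
  else x
termination_by x.toNat
decreasing_by exact h.2

-- literal port of A; the toNat guard on the tail call only makes it total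
-- (on Pre_ it always holds: x strictly decreases)
def solve (x : Int) (y : Int) (k : Int) : Int :=
  if k = 0 then x
  else if x < y then PySem.Int.mod (x - 1 + k) (y - 1) + 1
  else if PySem.Int.mod (-x) y > k then
    (if PySem.Int.mod (x + k) y = 0 then PySem.Int.floordiv (x + k) y else x + k)
  else if h : (stripFactors (x + PySem.Int.mod (-x) y) y).toNat < x.toNat then
    solve (stripFactors (x + PySem.Int.mod (-x) y) y) y (k - PySem.Int.mod (-x) y)
  else 0
termination_by x.toNat
decreasing_by exact h

-- ===== PORT B =====
-- the 'while x >= y' loop of Source B; the toNat guard only makes it total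
def solveAltLoop (x : Int) (y : Int) (k : Int) : Int :=
  if x ≥ y then
    if k < PySem.Int.mod (-x) y then
      (if PySem.Int.mod (x + k) y = 0 then PySem.Int.floordiv (x + k) y else x + k)
    else if k - PySem.Int.mod (-x) y = 0 then stripFactors (x + PySem.Int.mod (-x) y) y
    else if h : (stripFactors (x + PySem.Int.mod (-x) y) y).toNat < x.toNat then
      solveAltLoop (stripFactors (x + PySem.Int.mod (-x) y) y) y (k - PySem.Int.mod (-x) y)
    else 0
  else PySem.Int.mod (x + k - 1) (y - 1) + 1
termination_by x.toNat
decreasing_by exact h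

def solve_alt (x : Int) (y : Int) (k : Int) : Int :=
  if k = 0 then x else solveAltLoop x y k

-- ===== PRECONDITION & SPEC =====
-- Pre_ excludes the degenerate inputs on which A raises ZeroDivisionError (y = 0
-- with k ≠ 0, or y = 1 with x < 1 ≤ |k|) or loops forever (e.g. y = 1, x ≥ 1, k > 0,
-- and most y < 0 inputs that reach the divide-out loop; a few of the latter do
-- return after deeper recursion — there B returns the same value).
def Pre_solve (x : Int) (y : Int) (k : Int) : Prop :=
  k = 0 ∨ 2 ≤ y ∨ (y = 1 ∧ 1 ≤ x ∧ k < 0) ∨ (y ≤ 0 ∧ x < y) ∨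
    (y < 0 ∧ y ≤ x ∧ k < PySem.Int.mod (-x) y)
instance (x : Int) (y : Int) (k : Int) : Decidable (Pre_solve x y k) := by unfold Pre_solve; infer_instance
def pvWitness_solve : Int × Int × Int := (10, 2, 3)

def Spec_solve (x : Int) (y : Int) (k : Int) (out : Int) : Prop := out = solve_alt x y k
instance (x : Int) (y : Int) (k : Int) (out : Int) : Decidable (Spec_solve x y k out) := by unfold Spec_solve; infer_instance

-- ===== CLAIM (what is proved, stated in full; the proofs are below) =====
def Claim_equal_solve : Prop := ∀ (x : Int) (y : Int) (k : Int), Dom_solve x y k → Pre_solve x y k → Spec_solve x y k (solve x y k)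

-- ===== LEMMAS AND PROOFS =====

theorem stripFactors_bounds (y : Int) (hy : 2 ≤ y) :
    ∀ n : Nat, ∀ x : Int, x.toNat ≤ n → 1 ≤ x →
      1 ≤ stripFactors x y ∧ stripFactors x y ≤ x := by
  intro n
  induction n with
  | zero => intro x hxn hx; omega
  | succ n ih =>
    intro x hxn hx
    rw [stripFactors]
    split
    · rename_i hg
      have hdvd : y ∣ x := (PySem.Int.mod_eq_zero_iff_dvd x y).mp hg.1
      have hyx : y ≤ x := Int.le_of_dvd (by omega) hdvd
      have h1 : 1 ≤ PySem.Int.floordiv x y := by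
        rw [PySem.Int.le_floordiv_iff_mul_le (by omega : (0:Int) < y)]; omega
      have hlt : (PySem.Int.floordiv x y).toNat < x.toNat := hg.2
      have hrec := ih (PySem.Int.floordiv x y) (by omega) h1
      exact ⟨hrec.1, by omega⟩
    · exact ⟨hx, le_refl x⟩

theorem stripFactors_le_div (y : Int) (hy : 2 ≤ y) (x : Int) (hx : 1 ≤ x)
    (hdvd : y ∣ x) : stripFactors x y ≤ PySem.Int.floordiv x y := by
  have hyx : y ≤ x := Int.le_of_dvd (by omega) hdvd
  have h1 : 1 ≤ PySem.Int.floordiv x y := by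
    rw [PySem.Int.le_floordiv_iff_mul_le (by omega : (0:Int) < y)]; omega
  have hdivlt : PySem.Int.floordiv x y < x := by
    rw [PySem.Int.floordiv_lt_iff_lt_mul (by omega : (0:Int) < y)]
    nlinarith
  rw [stripFactors]
  rw [dif_pos ⟨(PySem.Int.mod_eq_zero_iff_dvd x y).mpr hdvd, by omega⟩]
  exact (stripFactors_bounds y hy (PySem.Int.floordiv x y).toNat _ le_rfl h1).2

theorem main_lemma (y : Int) (hy : 2 ≤ y) :
    ∀ n : Nat, ∀ x k : Int, x.toNat < n → k ≠ 0 →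
      solve x y k = solveAltLoop x y k := by
  intro n
  induction n with
  | zero => intro x k hxn hk; omega
  | succ n ih =>
    intro x k hxn hk
    rw [solve, solveAltLoop]
    by_cases hxy : x < y
    · rw [if_neg hk, if_pos hxy, if_neg (by omega : ¬ x ≥ y)]
      have : x - 1 + k = x + k - 1 := by ring
      rw [this]
    · -- x ≥ y ≥ 2
      rw [if_neg hk, if_neg hxy, if_pos (by omega : x ≥ y)]
      by_cases hreq : PySem.Int.mod (-x) y > k
      · rw [if_pos hreq, if_pos hreq]
      · rw [if_neg hreq, if_neg hreq]
        -- facts about req and the stripped value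
        have hreq0 : 0 ≤ PySem.Int.mod (-x) y := PySem.Int.mod_nonneg (-x) (by omega)
        have hreqlt : PySem.Int.mod (-x) y < y := PySem.Int.mod_lt (-x) (by omega)
        have heq := PySem.Int.floordiv_mul_add_mod (-x) y
        have hdvd : y ∣ (x + PySem.Int.mod (-x) y) :=
          ⟨-(PySem.Int.floordiv (-x) y), by linarith⟩
        have hx1 : (1:Int) ≤ x + PySem.Int.mod (-x) y := by omega
        have hble := stripFactors_le_div y hy _ hx1 hdvd
        have hb1 := stripFactors_bounds y hy (x + PySem.Int.mod (-x) y).toNat _ le_rfl hx1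
        have hdivlt : PySem.Int.floordiv (x + PySem.Int.mod (-x) y) y < x := by
          rw [PySem.Int.floordiv_lt_iff_lt_mul (by omega : (0:Int) < y)]
          nlinarith
        have hlt : (stripFactors (x + PySem.Int.mod (-x) y) y).toNat < x.toNat := by omega
        rw [dif_pos hlt]
        by_cases hk' : k - PySem.Int.mod (-x) y = 0
        · rw [if_pos hk', hk', solve, if_pos rfl]
        · rw [if_neg hk', dif_pos hlt]
          exact ih _ _ (by omega) hk'

-- ===== VERDICT (by name: the statement is the Claim_ definition above) =====
theorem solve_spec : Claim_equal_solve := by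
  intro x y k _ hpre
  unfold Spec_solve solve_alt
  by_cases hk : k = 0
  · subst hk; simp [solve]
  · simp only [if_neg hk]
    rcases hpre with h0 | hy | ⟨hy1, hx1, hkneg⟩ | ⟨hyneg, hxy⟩ | ⟨hyneg, hxy, hkreq⟩
    · exact absurd h0 hk
    · exact main_lemma y hy (x.toNat + 1) x k (Nat.lt_succ_self _) hk
    · -- y = 1, x ≥ 1, k < 0: both take the identical early-return branch
      subst hy1
      have hm : PySem.Int.mod (-x) 1 = 0 :=
        (PySem.Int.mod_eq_zero_iff_dvd (-x) 1).mpr (one_dvd _)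
      rw [solve, solveAltLoop, if_neg hk, if_neg (by omega : ¬ x < 1),
        if_pos (by omega : PySem.Int.mod (-x) 1 > k),
        if_pos (by omega : x ≥ 1), if_pos (by omega : k < PySem.Int.mod (-x) 1)]
    · -- y ≤ 0, x < y: both return the modular formula
      rw [solve, solveAltLoop, if_neg hk, if_pos hxy, if_neg (by omega : ¬ x ≥ y)]
      have h : x - 1 + k = x + k - 1 := by ring
      rw [h]
    · -- y < 0, x ≥ y, k < (-x) % y: both take the identical early-return branch
      rw [solve, solveAltLoop, if_neg hk, if_neg (by omega : ¬ x < y),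
        if_pos (by exact hkreq), if_pos (by omega : x ≥ y), if_pos hkreq]
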